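-- pv_equiv track=rewrite | github.com/younghu-kim/xi-bundle-gl2 | scripts/ramanujan_delta_blind_56.py | compute_tau_qexpansion
-- ===== SOURCE A (Python) =====
-- from math import comb
--
-- def compute_tau_qexpansion(n_max):
--     """
--     τ(n) via q-expansion: Δ(q) = q · ∏_{m≥1}(1-q^m)²⁴
--     정수 연산 (정확), n=1..n_max.
--     ★ #46에서 그대로 복사
--     """
--     N = n_max
--     coeffs = [0] * N
--     coeffs[0] = 1
--
--     for m in range(1, N):
--         new = [0] * N
--         for j in range(N):
--             if coeffs[j] == 0:
--                 continue
--             for k in range(25):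
--                 idx = j + m * k
--                 if idx >= N:
--                     break
--                 sign = 1 if k % 2 == 0 else -1
--                 new[idx] += coeffs[j] * comb(24, k) * sign
--         coeffs = new
--
--     tau = [0] * (n_max + 1)
--     for n in range(1, n_max + 1):
--         tau[n] = coeffs[n - 1]
--
--     return tau
-- ===== SOURCE B (Python) =====
-- def compute_tau_qexpansion(n_max):
--     N = n_max
--     coeffs = [0] * N
--     coeffs[0] = 1
--     for m in range(1, N):
--         for _ in range(24):
--             # multiply the truncated series by (1 - q^m): one shifted subtraction
--             coeffs = coeffs[:m] + [x - y for x, y in zip(coeffs[m:], coeffs)]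
--     return [0] + coeffs
-- ===== Notes on version B (the rewrite author's own statement) =====
-- stated objective: simpler
-- what changed: Instead of expanding (1-q^m)^24 with binomial coefficients and scattering up to 25 terms per nonzero coefficient into a fresh array, B multiplies the truncated series by (1-q^m) twenty-four times, each multiplication being a single shifted subtraction pass with no binomial coefficients at all; equivalence is the binomial theorem.
import Mathlib
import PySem

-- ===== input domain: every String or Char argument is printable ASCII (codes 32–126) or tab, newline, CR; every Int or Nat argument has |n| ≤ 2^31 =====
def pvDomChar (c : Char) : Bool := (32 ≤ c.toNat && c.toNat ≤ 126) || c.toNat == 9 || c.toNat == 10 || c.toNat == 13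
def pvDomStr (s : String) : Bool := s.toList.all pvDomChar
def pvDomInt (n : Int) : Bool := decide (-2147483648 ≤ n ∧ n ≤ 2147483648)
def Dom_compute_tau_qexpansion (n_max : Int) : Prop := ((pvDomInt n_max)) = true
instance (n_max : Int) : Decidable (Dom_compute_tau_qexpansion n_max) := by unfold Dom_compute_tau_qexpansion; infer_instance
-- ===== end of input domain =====

-- B replaces A's binomial expansion of (1-q^m)^24 (25-term scatter per nonzero coefficient into a
-- fresh array) by 24 plain shifted-subtraction passes (multiply by (1-q^m) 24 times); objective: simpler.

-- ===== PORT A =====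

-- new[idx] += v  (idx is always < length where A uses it)
def pvBump (l : List Int) (i : Nat) (v : Int) : List Int := l.set i (l.getD i 0 + v)

-- A's inner k-loop: 'for k in range(25): idx = j+m*k; if idx >= N: break; new[idx] += ...'
def pvInnerA (N m j : Nat) (c : Int) (k : Nat) (new : List Int) : List Int :=
  if _h : k < 25 then
    if N ≤ j + m * k then new  -- break
    else pvInnerA N m j c (k + 1)
      (pvBump new (j + m * k) (c * (Nat.choose 24 k : Int) * (if k % 2 = 0 then 1 else -1)))
  else new
termination_by 25 - k

-- A's j-loop for one m: build 'new' from scratch, skipping zero coefficients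
def pvStepA (N m : Nat) (coeffs : List Int) : List Int :=
  (List.range N).foldl
    (fun new j => if coeffs.getD j 0 = 0 then new else pvInnerA N m j (coeffs.getD j 0) 0 new)
    (List.replicate N 0)

def compute_tau_qexpansion (n_max : Int) : List Int :=
  let N := n_max.toNat
  let c0 := (List.replicate N (0 : Int)).set 0 1
  let cf := (List.range' 1 (N - 1)).foldl (fun c m => pvStepA N m c) c0  -- for m in range(1, N)
  -- tau = [0]*(n_max+1); for n in range(1, n_max+1): tau[n] = coeffs[n-1]
  (List.range' 1 N).foldl (fun t n => t.set n (cf.getD (n - 1) 0)) (List.replicate (N + 1) 0)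

-- ===== PORT B =====

-- one multiplication of the truncated series by (1 - q^m):
-- coeffs[:m] + [x - y for x, y in zip(coeffs[m:], coeffs)]
def pvPassB (_N m : Nat) (l : List Int) : List Int :=
  l.take m ++ List.zipWith (fun x y => x - y) (l.drop m) l

def compute_tau_qexpansion_alt (n_max : Int) : List Int :=
  let N := n_max.toNat
  let c0 := (List.replicate N (0 : Int)).set 0 1
  let cf := (List.range' 1 (N - 1)).foldl
    (fun c m => (List.range 24).foldl (fun c _ => pvPassB N m c) c) c0
  0 :: cf  -- [0] + coeffs

-- ===== PRECONDITION & SPEC =====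
-- Python A (and B alike) raise IndexError on 'coeffs[0] = 1' when n_max <= 0; those inputs are excluded.
def Pre_compute_tau_qexpansion (n_max : Int) : Prop := 1 ≤ n_max
instance (n_max : Int) : Decidable (Pre_compute_tau_qexpansion n_max) := by
  unfold Pre_compute_tau_qexpansion; infer_instance

def pvWitness_compute_tau_qexpansion : Int := 3

def Spec_compute_tau_qexpansion (n_max : Int) (out : List Int) : Prop :=
  out = compute_tau_qexpansion_alt n_max
instance (n_max : Int) (out : List Int) : Decidable (Spec_compute_tau_qexpansion n_max out) := by
  unfold Spec_compute_tau_qexpansion; infer_instance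

-- ===== CLAIM =====
def Claim_equal_compute_tau_qexpansion : Prop :=
  ∀ (n_max : Int), Dom_compute_tau_qexpansion n_max → Pre_compute_tau_qexpansion n_max →
    Spec_compute_tau_qexpansion n_max (compute_tau_qexpansion n_max)

-- ===== LEMMAS AND PROOFS =====

theorem pv_getD_set (l : List Int) (n i : Nat) (v : Int) :
    (l.set n v).getD i 0 = if i = n ∧ n < l.length then v else l.getD i 0 := by
  rcases Decidable.em (i = n ∧ n < l.length) with h | h
  · obtain ⟨rfl, h2⟩ := h
    simp [List.getD, h2]
  · rw [if_neg h]
    by_cases hi : i = n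
    · subst hi
      have : ¬ i < l.length := fun hc => h ⟨rfl, hc⟩
      simp [List.getD, this]
    · simp [List.getD, List.getElem?_set_ne (by omega : n ≠ i)]

theorem pv_sign (k : Nat) : (if k % 2 = 0 then (1 : Int) else -1) = (-1 : Int) ^ k := by
  rcases Nat.even_or_odd k with h | h
  · simp [Nat.even_iff.mp h, h.neg_one_pow]
  · simp [Nat.odd_iff.mp h, h.neg_one_pow]

theorem pv_len_passB (N m : Nat) (l : List Int) (hl : l.length = N) :
    (pvPassB N m l).length = N := by
  simp [pvPassB, hl]
  omega

theorem pv_passB_hi (N m : Nat) (l : List Int) (i : Nat) (hl : l.length = N) (hi : i < N)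
    (hm : m ≤ i) :
    ((List.take m l ++ List.zipWith (fun x y => x - y) (List.drop m l) l)[i]?).getD 0
      = (l[i]?).getD 0 - (l[(i - m)]?).getD 0 := by
  have ht : (List.take m l).length = m := by simp [hl]; omega
  rw [List.getElem?_append_right (by rw [ht]; omega), ht]
  rw [List.getElem?_zipWith, List.getElem?_drop]
  have e1 : m + (i - m) = i := by omega
  rw [e1, List.getElem?_eq_getElem (by omega : i < l.length),
      List.getElem?_eq_getElem (by omega : i - m < l.length)]
  rfl

theorem pv_passB_lo (N m : Nat) (l : List Int) (i : Nat) (hl : l.length = N) (hi : i < N)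
    (hm : ¬ m ≤ i) :
    ((List.take m l ++ List.zipWith (fun x y => x - y) (List.drop m l) l)[i]?).getD 0
      = (l[i]?).getD 0 := by
  rw [List.getElem?_append_left (by simp [hl]; omega), List.getElem?_take, if_pos (by omega)]

theorem pv_getD_passB (N m : Nat) (l : List Int) (i : Nat) (hl : l.length = N) (hi : i < N) :
    (pvPassB N m l).getD i 0 = l.getD i 0 - (if m ≤ i then l.getD (i - m) 0 else 0) := by
  unfold pvPassB
  rw [List.getD_eq_getElem?_getD, List.getD_eq_getElem?_getD, List.getD_eq_getElem?_getD]
  by_cases hm : m ≤ i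
  · rw [if_pos hm]
    exact pv_passB_hi N m l i hl hi hm
  · rw [if_neg hm, sub_zero]
    exact pv_passB_lo N m l i hl hi hm

theorem pv_len_innerA (N m j : Nat) (c : Int) (k : Nat) (new : List Int) :
    (pvInnerA N m j c k new).length = new.length := by
  fun_induction pvInnerA with
  | case1 => rfl
  | case2 k new h1 h2 ih => simpa [pvBump] using ih
  | case3 => rfl

theorem pv_getD_innerA (N m j : Nat) (c : Int) (k : Nat) (new : List Int)
    (hlen : new.length = N) (i : Nat) (hi : i < N) :
    (pvInnerA N m j c k new).getD i 0 =
      new.getD i 0 + ∑ k' ∈ Finset.Ico k 25,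
        (if j + m * k' = i then c * (Nat.choose 24 k' : Int) * (-1 : Int) ^ k' else 0) := by
  fun_induction pvInnerA with
  | case1 k new h1 h2 =>
    rw [Finset.sum_eq_zero, add_zero]
    intro k' hk'
    rw [if_neg]
    intro he
    have hk : k ≤ k' := (Finset.mem_Ico.mp hk').1
    have : j + m * k ≤ j + m * k' :=
      Nat.add_le_add_left (Nat.mul_le_mul_left m hk) j
    omega
  | case2 k new h1 h2 ih =>
    have hidx : j + m * k < N := by omega
    simp only [dite_eq_ite] at ih
    rw [ih (by simpa [pvBump] using hlen)]
    rw [Finset.sum_eq_sum_Ico_succ_bot (by omega : k < 25)]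
    rw [pvBump, pv_getD_set, pv_sign]
    by_cases he : i = j + m * k
    · rw [if_pos ⟨he, by omega⟩, if_pos (by omega), ← he]
      ring
    · rw [if_neg (by tauto), if_neg (by omega)]
      ring
  | case3 k new h1 =>
    rw [Finset.Ico_eq_empty (by omega), Finset.sum_empty, add_zero]

theorem pv_len_stepA_fold (N m : Nat) (coeffs : List Int) :
    ∀ (js : List Nat) (new : List Int),
      (js.foldl (fun new j =>
          if coeffs.getD j 0 = 0 then new else pvInnerA N m j (coeffs.getD j 0) 0 new) new).length
        = new.length := by
  intro js
  induction js with
  | nil => intro new; rfl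
  | cons j js ih =>
    intro new
    rw [List.foldl_cons, ih]
    by_cases h : coeffs.getD j 0 = 0
    · rw [if_pos h]
    · rw [if_neg h, pv_len_innerA]

theorem pv_len_stepA (N m : Nat) (coeffs : List Int) : (pvStepA N m coeffs).length = N := by
  unfold pvStepA
  rw [pv_len_stepA_fold]
  simp

theorem pv_stepA_fold (N m : Nat) (coeffs : List Int) (i : Nat) (hi : i < N) :
    ∀ (js : List Nat) (new : List Int), new.length = N →
      (js.foldl (fun new j =>
          if coeffs.getD j 0 = 0 then new else pvInnerA N m j (coeffs.getD j 0) 0 new) new).getD i 0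
        = new.getD i 0 + (js.map (fun j => ∑ k ∈ Finset.range 25,
            if j + m * k = i then coeffs.getD j 0 * (Nat.choose 24 k : Int) * (-1 : Int) ^ k
            else 0)).sum := by
  intro js
  induction js with
  | nil => intro new _; simp
  | cons j js ih =>
    intro new hlen
    rw [List.foldl_cons, List.map_cons, List.sum_cons]
    by_cases h : coeffs.getD j 0 = 0
    · rw [if_pos h, ih new hlen]
      have hz : (∑ k ∈ Finset.range 25,
          if j + m * k = i then coeffs.getD j 0 * (Nat.choose 24 k : Int) * (-1 : Int) ^ k
          else 0) = 0 := by
        apply Finset.sum_eq_zero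
        intro k _
        rw [h]
        simp
      rw [hz]
      ring
    · rw [if_neg h, ih _ (by rw [pv_len_innerA]; exact hlen)]
      rw [pv_getD_innerA N m j _ 0 new hlen i hi, ← Finset.range_eq_Ico]
      ring

theorem pv_list_range_sum (n : Nat) (g : Nat → Int) :
    ((List.range n).map g).sum = ∑ j ∈ Finset.range n, g j := by
  induction n with
  | zero => simp
  | succ n ih =>
    rw [List.range_succ, List.map_append, List.sum_append, Finset.sum_range_succ, ih]
    simp

theorem pv_collapse (N i : Nat) (hi : i < N) (v : Nat) (g : Nat → Int) :
    (∑ j ∈ Finset.range N, if j + v = i then g j else 0) = if v ≤ i then g (i - v) else 0 := by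
  by_cases h : v ≤ i
  · rw [if_pos h, Finset.sum_eq_single (i - v)]
    · rw [if_pos (by omega)]
    · intro j _ hj; rw [if_neg (by omega)]
    · intro hmem; exact absurd (Finset.mem_range.mpr (by omega)) hmem
  · rw [if_neg h]
    apply Finset.sum_eq_zero
    intro j _
    rw [if_neg (by omega)]

theorem pv_getD_stepA (N m : Nat) (coeffs : List Int) (i : Nat) (hi : i < N) :
    (pvStepA N m coeffs).getD i 0 =
      ∑ k ∈ Finset.range 25,
        (if m * k ≤ i then coeffs.getD (i - m * k) 0 * (Nat.choose 24 k : Int) * (-1 : Int) ^ k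
         else 0) := by
  unfold pvStepA
  rw [pv_stepA_fold N m coeffs i hi (List.range N) _ (by simp)]
  rw [pv_list_range_sum]
  have hz : (List.replicate N (0 : Int)).getD i 0 = 0 := by simp [List.getD]
  rw [hz, zero_add, Finset.sum_comm]
  refine Finset.sum_congr rfl fun k _ => ?_
  exact pv_collapse N i hi (m * k)
    (fun j => coeffs.getD j 0 * (Nat.choose 24 k : Int) * (-1 : Int) ^ k)

theorem pv_iter_succ (N m t : Nat) (l : List Int) :
    (List.range (t + 1)).foldl (fun c _ => pvPassB N m c) l
      = pvPassB N m ((List.range t).foldl (fun c _ => pvPassB N m c) l) := by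
  rw [List.range_succ, List.foldl_append]
  rfl

theorem pv_len_iterB (N m : Nat) (l : List Int) (t : Nat) (hl : l.length = N) :
    ((List.range t).foldl (fun c _ => pvPassB N m c) l).length = N := by
  induction t with
  | zero => exact hl
  | succ t ih => rw [pv_iter_succ]; exact pv_len_passB N m _ ih

theorem pv_pascal (t : Nat) (w : Nat → Int) :
    (∑ k ∈ Finset.range (t + 2), (-1 : Int) ^ k * (Nat.choose (t + 1) k : Int) * w k)
      = (∑ k ∈ Finset.range (t + 1), (-1 : Int) ^ k * (Nat.choose t k : Int) * w k)
        - ∑ k ∈ Finset.range (t + 1), (-1 : Int) ^ k * (Nat.choose t k : Int) * w (k + 1) := by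
  rw [Finset.sum_range_succ' (fun k => (-1 : Int) ^ k * (Nat.choose (t + 1) k : Int) * w k) (t + 1)]
  have h1 : (∑ k ∈ Finset.range (t + 1),
        (-1 : Int) ^ (k + 1) * (Nat.choose (t + 1) (k + 1) : Int) * w (k + 1))
      = (∑ k ∈ Finset.range (t + 1),
          (-1 : Int) ^ (k + 1) * (Nat.choose t (k + 1) : Int) * w (k + 1))
        - ∑ k ∈ Finset.range (t + 1), (-1 : Int) ^ k * (Nat.choose t k : Int) * w (k + 1) := by
    rw [← Finset.sum_sub_distrib]
    refine Finset.sum_congr rfl fun k _ => ?_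
    push_cast [Nat.choose_succ_succ]
    ring
  have h2 : (∑ k ∈ Finset.range (t + 1),
        (-1 : Int) ^ (k + 1) * (Nat.choose t (k + 1) : Int) * w (k + 1))
      = ∑ k ∈ Finset.range t, (-1 : Int) ^ (k + 1) * (Nat.choose t (k + 1) : Int) * w (k + 1) := by
    rw [Finset.sum_range_succ, Nat.choose_succ_self]
    simp
  have h3 : (∑ k ∈ Finset.range (t + 1), (-1 : Int) ^ k * (Nat.choose t k : Int) * w k)
      = (∑ k ∈ Finset.range t, (-1 : Int) ^ (k + 1) * (Nat.choose t (k + 1) : Int) * w (k + 1))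
        + (-1 : Int) ^ 0 * (Nat.choose t 0 : Int) * w 0 := by
    rw [Finset.sum_range_succ' (fun k => (-1 : Int) ^ k * (Nat.choose t k : Int) * w k) t]
  simp only [h1, h2]
  rw [h3]
  simp
  ring

theorem pv_iterB_getD (N m : Nat) (l : List Int) (t : Nat) (hl : l.length = N) :
    ∀ i, i < N →
      ((List.range t).foldl (fun c _ => pvPassB N m c) l).getD i 0 =
        ∑ k ∈ Finset.range (t + 1),
          ((-1 : Int) ^ k * (Nat.choose t k : Int) *
            (if m * k ≤ i then l.getD (i - m * k) 0 else 0)) := by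
  induction t with
  | zero => intro i hi; simp
  | succ t ih =>
    intro i hi
    rw [pv_iter_succ, pv_getD_passB N m _ i (pv_len_iterB N m l t hl) hi, ih i hi]
    have key : (if m ≤ i then
          ((List.range t).foldl (fun c _ => pvPassB N m c) l).getD (i - m) 0 else 0)
        = ∑ k ∈ Finset.range (t + 1),
            ((-1 : Int) ^ k * (Nat.choose t k : Int) *
              (if m * (k + 1) ≤ i then l.getD (i - m * (k + 1)) 0 else 0)) := by
      by_cases hm : m ≤ i
      · rw [if_pos hm, ih (i - m) (by omega)]
        refine Finset.sum_congr rfl fun k _ => ?_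
        congr 1
        by_cases hk : m * k ≤ i - m
        · rw [if_pos hk, if_pos (by rw [Nat.mul_succ]; omega)]
          congr 1
          rw [Nat.mul_succ]
          omega
        · rw [if_neg hk, if_neg (by rw [Nat.mul_succ]; omega)]
      · rw [if_neg hm]
        symm
        apply Finset.sum_eq_zero
        intro k _
        have hnc : ¬ m * (k + 1) ≤ i := by rw [Nat.mul_succ]; omega
        simp [hnc]
    rw [key]
    exact (pv_pascal t fun k => if m * k ≤ i then l.getD (i - m * k) 0 else 0).symm

theorem pv_step_eq (N m : Nat) (l : List Int) (hlen : l.length = N) :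
    pvStepA N m l = (List.range 24).foldl (fun c _ => pvPassB N m c) l := by
  apply List.ext_getElem
  · rw [pv_len_stepA, pv_len_iterB N m l 24 hlen]
  · intro i h1 h2
    have hi : i < N := by rw [pv_len_stepA] at h1; exact h1
    rw [← List.getD_eq_getElem _ 0, ← List.getD_eq_getElem _ 0]
    rw [pv_getD_stepA N m l i hi, pv_iterB_getD N m l 24 hlen i hi]
    refine Finset.sum_congr rfl fun k _ => ?_
    by_cases hk : m * k ≤ i
    · rw [if_pos hk, if_pos hk]; ring
    · rw [if_neg hk, if_neg hk]; ring

theorem pv_fold_eq (N : Nat) : ∀ (ms : List Nat) (l : List Int), l.length = N →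
    ms.foldl (fun c m => pvStepA N m c) l
      = ms.foldl (fun c m => (List.range 24).foldl (fun c _ => pvPassB N m c) c) l := by
  intro ms
  induction ms with
  | nil => intro l _; rfl
  | cons m ms ih =>
    intro l hlen
    rw [List.foldl_cons, List.foldl_cons, pv_step_eq N m l hlen]
    exact ih _ (pv_len_iterB N m l 24 hlen)

theorem pv_len_foldB (N : Nat) : ∀ (ms : List Nat) (l : List Int), l.length = N →
    (ms.foldl (fun c m => (List.range 24).foldl (fun c _ => pvPassB N m c) c) l).length = N := by
  intro ms
  induction ms with
  | nil => intro l hl; exact hl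
  | cons m ms ih =>
    intro l hl
    rw [List.foldl_cons]
    exact ih _ (pv_len_iterB N m l 24 hl)

theorem pv_foldl_set_len (g : Nat → Int) : ∀ (ns : List Nat) (t : List Int),
    (ns.foldl (fun t n => t.set n (g n)) t).length = t.length := by
  intro ns
  induction ns with
  | nil => intro t; rfl
  | cons n ns ih =>
    intro t
    rw [List.foldl_cons, ih]
    simp

theorem pv_foldl_set_getD (g : Nat → Int) :
    ∀ (len a : Nat) (t : List Int) (i : Nat),
      ((List.range' a len).foldl (fun t n => t.set n (g n)) t).getD i 0
        = if a ≤ i ∧ i < a + len ∧ i < t.length then g i else t.getD i 0 := by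
  intro len
  induction len with
  | zero =>
    intro a t i
    rw [show List.range' a 0 = [] from rfl, List.foldl_nil, if_neg (by omega)]
  | succ len ih =>
    intro a t i
    rw [show List.range' a (len + 1) = a :: List.range' (a + 1) len from rfl]
    rw [List.foldl_cons, ih (a + 1) (t.set a (g a)) i, pv_getD_set]
    simp only [List.length_set]
    by_cases h1 : (a + 1 ≤ i ∧ i < a + 1 + len ∧ i < t.length)
    · rw [if_pos h1, if_pos (by omega)]
    · rw [if_neg h1]
      by_cases h2 : (i = a ∧ a < t.length)
      · rw [if_pos h2, if_pos (by omega), h2.1]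
      · rw [if_neg h2, if_neg (by omega)]

theorem pv_tau_eq (N : Nat) (cf : List Int) (h : cf.length = N) :
    (List.range' 1 N).foldl (fun t n => t.set n (cf.getD (n - 1) 0)) (List.replicate (N + 1) 0)
      = 0 :: cf := by
  apply List.ext_getElem
  · rw [pv_foldl_set_len]
    simp [h]
  · intro i h1 h2
    have hi : i < N + 1 := by
      rw [pv_foldl_set_len] at h1
      simpa using h1
    rw [← List.getD_eq_getElem _ 0, ← List.getD_eq_getElem _ 0]
    rw [pv_foldl_set_getD]
    simp only [List.length_replicate]
    cases i with
    | zero =>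
      rw [if_neg (by omega)]
      simp [List.getD]
    | succ j =>
      rw [if_pos (by omega)]
      simp [List.getD]

-- ===== VERDICT =====
theorem compute_tau_qexpansion_spec : Claim_equal_compute_tau_qexpansion := by
  intro n_max _hdom _hpre
  unfold Spec_compute_tau_qexpansion
  simp only [compute_tau_qexpansion, compute_tau_qexpansion_alt]
  have hc0 : ((List.replicate n_max.toNat (0 : Int)).set 0 1).length = n_max.toNat := by simp
  rw [pv_fold_eq n_max.toNat (List.range' 1 (n_max.toNat - 1)) _ hc0]
  exact pv_tau_eq n_max.toNat _
    (pv_len_foldB n_max.toNat (List.range' 1 (n_max.toNat - 1)) _ hc0)
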